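-- pv_equiv track=rewrite | github.com/mousomer/tet4d | src/tet4d/ui/pygame/topology_lab/piece_sandbox.py | _fit_origin_for_blocks
-- ===== SOURCE A (Python) =====
-- def _fit_origin_for_blocks(
--     blocks: tuple[tuple[int, ...], ...], dims: tuple[int, ...]
-- ) -> tuple[int, ...]:
--     fitted: list[int] = []
--     for axis, size in enumerate(dims):
--         min_block = min(block[axis] for block in blocks)
--         max_block = max(block[axis] for block in blocks)
--         min_origin = -min_block
--         max_origin = size - 1 - max_block
--         if min_origin > max_origin:
--             fitted.append(min_origin)
--             continue
--         center = max(0, size // 2)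
--         fitted.append(max(min_origin, min(max_origin, center)))
--     return tuple(fitted)
-- ===== SOURCE B (Python) =====
-- def _fit_origin_for_blocks(
--     blocks: tuple[tuple[int, ...], ...], dims: tuple[int, ...]
-- ) -> tuple[int, ...]:
--     n = len(dims)
--     # Pass 1: per-axis running minima/maxima over all blocks.
--     mins = [None] * n
--     maxs = [None] * n
--     for block in blocks:
--         mins = [v if m is None or v < m else m for m, v in zip(mins, block)]
--         maxs = [v if m is None or v > m else m for m, v in zip(maxs, block)]
--     # Pass 2: clamp each axis's origin into its feasible interval.
--     fitted = []
--     for axis, size in enumerate(dims):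
--         min_origin = -mins[axis]
--         max_origin = size - 1 - maxs[axis]
--         if min_origin > max_origin:
--             fitted.append(min_origin)
--             continue
--         center = max(0, size // 2)
--         fitted.append(max(min_origin, min(max_origin, center)))
--     return tuple(fitted)
-- ===== Notes on version B (the rewrite author's own statement) =====
-- stated objective: alternative
-- what changed: B replaces A's per-axis rescans of all blocks (min()/max() generator inside the axis loop) by a single pass over blocks that builds per-axis mins/maxs arrays, followed by an independent clamping pass over dims.
import Mathlib
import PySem

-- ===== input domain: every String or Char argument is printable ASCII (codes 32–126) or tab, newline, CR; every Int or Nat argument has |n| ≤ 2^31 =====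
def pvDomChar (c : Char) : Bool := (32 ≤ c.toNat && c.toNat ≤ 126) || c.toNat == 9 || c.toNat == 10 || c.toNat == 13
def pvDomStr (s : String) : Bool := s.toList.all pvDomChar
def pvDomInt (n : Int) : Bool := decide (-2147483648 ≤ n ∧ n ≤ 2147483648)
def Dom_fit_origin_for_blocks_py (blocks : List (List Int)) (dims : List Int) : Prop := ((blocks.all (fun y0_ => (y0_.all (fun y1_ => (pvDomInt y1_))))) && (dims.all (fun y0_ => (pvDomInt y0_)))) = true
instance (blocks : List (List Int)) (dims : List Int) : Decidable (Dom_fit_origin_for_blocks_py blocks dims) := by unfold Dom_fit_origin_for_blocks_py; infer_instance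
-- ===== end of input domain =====

-- B replaces A's per-axis rescans of all blocks by one pass building per-axis mins/maxs, then a clamping pass over dims (alternative decomposition, same cost).

-- ===== PORT A =====
-- min()/max() over 'block[axis] for block in blocks': Python raises ValueError on empty
-- blocks and IndexError on a block shorter than dims (both excluded by Pre_);
-- pyGetD totalizes the IndexError with 0 and the [] match arm the ValueError with 0.
def fit_origin_for_blocks_py (blocks : List (List Int)) (dims : List Int) : List Int :=
  (PySem.List.enumerate dims 0).foldl (fun fitted p =>
    let axis := p.1
    let size := p.2
    let vals := blocks.map (fun b => PySem.List.pyGetD b axis 0)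
    let min_block := match vals with | [] => 0 | x :: xs => xs.foldl min x
    let max_block := match vals with | [] => 0 | x :: xs => xs.foldl max x
    let min_origin := -min_block
    let max_origin := size - 1 - max_block
    if min_origin > max_origin then fitted ++ [min_origin]
    else
      let center := max 0 (PySem.Int.floordiv size 2)
      fitted ++ [max min_origin (min max_origin center)]) []

-- ===== PORT B =====
-- 'v if m is None or v < m else m' of the pass-1 comprehensions in Source B
def pvUpdMin (m : Option Int) (v : Int) : Option Int :=
  match m with | none => some v | some m => if v < m then some v else some m
def pvUpdMax (m : Option Int) (v : Int) : Option Int :=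
  match m with | none => some v | some m => if v > m then some v else some m
-- mins[axis] = None (empty blocks) makes Python raise TypeError on '-None' (excluded by
-- Pre_); '.getD 0' totalizes that, and pyGetD totalizes the IndexError of a short block.
def fit_origin_for_blocks_py_alt (blocks : List (List Int)) (dims : List Int) : List Int :=
  let n := dims.length
  let st := blocks.foldl
    (fun (st : List (Option Int) × List (Option Int)) block =>
      (List.zipWith pvUpdMin st.1 block, List.zipWith pvUpdMax st.2 block))
    (List.replicate n none, List.replicate n none)
  (PySem.List.enumerate dims 0).foldl (fun fitted p =>
    let axis := p.1
    let size := p.2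
    let min_origin := -((PySem.List.pyGetD st.1 axis none).getD 0)
    let max_origin := size - 1 - ((PySem.List.pyGetD st.2 axis none).getD 0)
    if min_origin > max_origin then fitted ++ [min_origin]
    else
      let center := max 0 (PySem.Int.floordiv size 2)
      fitted ++ [max min_origin (min max_origin center)]) []

-- ===== PRECONDITION & SPEC =====
-- Pre_ excludes exactly the inputs where A raises: ValueError from min()/max() when
-- blocks is empty while dims is not, and IndexError when some block is shorter than dims.
def Pre_fit_origin_for_blocks_py (blocks : List (List Int)) (dims : List Int) : Prop :=
  dims = [] ∨ (blocks ≠ [] ∧ ∀ b ∈ blocks, dims.length ≤ b.length)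
instance (blocks : List (List Int)) (dims : List Int) : Decidable (Pre_fit_origin_for_blocks_py blocks dims) := by unfold Pre_fit_origin_for_blocks_py; infer_instance
def pvWitness_fit_origin_for_blocks_py : List (List Int) × List Int := ([[0, 1], [2, 0]], [5, 4])
def Spec_fit_origin_for_blocks_py (blocks : List (List Int)) (dims : List Int) (out : List Int) : Prop := out = fit_origin_for_blocks_py_alt blocks dims
instance (blocks : List (List Int)) (dims : List Int) (out : List Int) : Decidable (Spec_fit_origin_for_blocks_py blocks dims out) := by unfold Spec_fit_origin_for_blocks_py; infer_instance

-- ===== CLAIM (what is proved, stated in full; the proofs are below) =====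
def Claim_equal_fit_origin_for_blocks_py : Prop := ∀ (blocks : List (List Int)) (dims : List Int), Dom_fit_origin_for_blocks_py blocks dims → Pre_fit_origin_for_blocks_py blocks dims → Spec_fit_origin_for_blocks_py blocks dims (fit_origin_for_blocks_py blocks dims)

-- ===== LEMMAS AND PROOFS =====

theorem pvUpdMin_some (m v : Int) : pvUpdMin (some m) v = some (min m v) := by
  show (if v < m then some v else some m) = some (min m v)
  split_ifs with h <;> (congr 1; omega)

theorem pvUpdMax_some (m v : Int) : pvUpdMax (some m) v = some (max m v) := by
  show (if v > m then some v else some m) = some (max m v)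
  split_ifs with h <;> (congr 1; omega)

-- pass-1 fold, one axis at a time: each cell folds its own axis
theorem foldZip_getD (f : Option Int → Int → Option Int) (blocks : List (List Int))
    (ms : List (Option Int)) (ax : Nat) (hax : ax < ms.length)
    (h : ∀ b ∈ blocks, ms.length ≤ b.length) :
    (blocks.foldl (fun ms b => List.zipWith f ms b) ms).getD ax none
      = blocks.foldl (fun o b => f o (b.getD ax 0)) (ms.getD ax none) := by
  induction blocks generalizing ms with
  | nil => rfl
  | cons b bs ih =>
    have hb : ms.length ≤ b.length := h b (by simp)
    have hlen : (List.zipWith f ms b).length = ms.length := by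
      simp [List.length_zipWith]; omega
    have hax' : ax < (List.zipWith f ms b).length := by omega
    have hcell : (List.zipWith f ms b).getD ax none = f (ms.getD ax none) (b.getD ax 0) := by
      rw [List.getD_eq_getElem _ _ hax', List.getElem_zipWith,
        List.getD_eq_getElem _ _ hax, List.getD_eq_getElem _ _ (by omega)]
    rw [List.foldl_cons, List.foldl_cons,
      ih (List.zipWith f ms b) (by omega) (fun c hc => by rw [hlen]; exact h c (by simp [hc])),
      hcell]

-- folding pvUpdMin/pvUpdMax from none over a nonempty list is Python's min/max
theorem foldUpdMin_eq (x : Int) (xs : List Int) :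
    xs.foldl (fun o v => pvUpdMin o v) (some x) = some (xs.foldl min x) := by
  induction xs generalizing x with
  | nil => rfl
  | cons y ys ih => simp [List.foldl_cons, pvUpdMin_some, ih]

theorem foldUpdMax_eq (x : Int) (xs : List Int) :
    xs.foldl (fun o v => pvUpdMax o v) (some x) = some (xs.foldl max x) := by
  induction xs generalizing x with
  | nil => rfl
  | cons y ys ih => simp [List.foldl_cons, pvUpdMax_some, ih]

-- the pair fold of Port B is the two independent per-component folds
theorem pvPairFold_eq (bls : List (List Int)) (p : List (Option Int) × List (Option Int)) :
    bls.foldl (fun st block => (List.zipWith pvUpdMin st.1 block, List.zipWith pvUpdMax st.2 block)) p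
      = (bls.foldl (fun ms b => List.zipWith pvUpdMin ms b) p.1,
         bls.foldl (fun ms b => List.zipWith pvUpdMax ms b) p.2) := by
  induction bls generalizing p with
  | nil => rfl
  | cons b bs ih => simp [List.foldl_cons, ih]

-- ===== VERDICT (by name: the statement is the Claim_ definition above) =====
theorem fit_origin_for_blocks_py_spec : Claim_equal_fit_origin_for_blocks_py := by
  intro blocks dims _hdom hpre
  unfold Spec_fit_origin_for_blocks_py fit_origin_for_blocks_py fit_origin_for_blocks_py_alt
  rcases hpre with hnil | ⟨hne, hlen⟩
  · subst hnil; rfl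
  · rcases blocks with _ | ⟨b0, bs⟩
    · exact absurd rfl hne
    apply PySem.List.foldl_congr_mem
    intro fitted p hp
    rw [PySem.List.mem_enumerate_iff] at hp
    obtain ⟨k, hk, rfl⟩ := hp
    have hk0 : (0 : Int) + (k : Int) = (k : Int) := by ring
    have hlen0 : ∀ b ∈ b0 :: bs, dims.length ≤ b.length := hlen
    -- pass-1 state at axis k
    have hmin := foldZip_getD pvUpdMin (b0 :: bs)
      (List.replicate dims.length none) k (by simpa using hk)
      (by simpa using hlen0)
    have hmax := foldZip_getD pvUpdMax (b0 :: bs)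
      (List.replicate dims.length none) k (by simpa using hk)
      (by simpa using hlen0)
    have hrep : (List.replicate dims.length (none : Option Int)).getD k none = none := by
      rw [List.getD_eq_getElem _ _ (by simpa using hk)]; simp
    rw [hrep] at hmin hmax
    have hm0 : pvUpdMin none (b0.getD k 0) = some (b0.getD k 0) := rfl
    have hx0 : pvUpdMax none (b0.getD k 0) = some (b0.getD k 0) := rfl
    have hminv : (b0 :: bs).foldl (fun o b => pvUpdMin o (b.getD k 0)) none
        = some ((bs.map (fun b => b.getD k 0)).foldl min (b0.getD k 0)) := by
      rw [List.foldl_cons, hm0]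
      have h2 := foldUpdMin_eq (b0.getD k 0) (bs.map (fun b => b.getD k 0))
      rw [List.foldl_map] at h2; exact h2
    have hmaxv : (b0 :: bs).foldl (fun o b => pvUpdMax o (b.getD k 0)) none
        = some ((bs.map (fun b => b.getD k 0)).foldl max (b0.getD k 0)) := by
      rw [List.foldl_cons, hx0]
      have h2 := foldUpdMax_eq (b0.getD k 0) (bs.map (fun b => b.getD k 0))
      rw [List.foldl_map] at h2; exact h2
    rw [hminv] at hmin
    rw [hmaxv] at hmax
    simp only [pvPairFold_eq, hk0, PySem.List.pyGetD_natCast, hmin, hmax, Option.getD_some,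
      List.map_cons]

-- (file ends here)
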